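-- pv_equiv track=rewrite | github.com/cfe-lab/proviral | scripts/compare_runs/index_discovery.py | find_unique_value_columns
-- ===== SOURCE A (Python) =====
-- from typing import List, Dict, Optional, Any
--
-- def find_unique_value_columns(csv_data: List[List[str]]) -> List[str]:
--     """
--     Find columns that contain only unique values (no duplicates).
--
--     Args:
--         csv_data: List of rows, where first row contains headers
--
--     Returns:
--         List of column names that have unique values
--     """
--     if not csv_data or len(csv_data) < 2:  # Need at least header + 1 data row
--         return []
--
--     headers = csv_data[0]
--     unique_columns = []
--
--     for col_idx, header in enumerate(headers):
--         # Collect all non-empty values in this column (skip header row)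
--         values = []
--         for row_idx in range(1, len(csv_data)):
--             if col_idx < len(csv_data[row_idx]):
--                 value = csv_data[row_idx][col_idx].strip()
--                 if value:  # Only consider non-empty values
--                     values.append(value)
--
--         # Check if all values are unique
--         if len(values) == len(set(values)):
--             unique_columns.append(header)
--
--     return unique_columns
-- ===== SOURCE B (Python) =====
-- from typing import List
--
--
-- def find_unique_value_columns(csv_data: List[List[str]]) -> List[str]:
--     """Row-major single pass: per-column seen-set and duplicate flag."""
--     if len(csv_data) < 2:
--         return []
--     headers = csv_data[0]
--     state = [[set(), False] for _ in headers]  # [seen values, has duplicate]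
--     for row in csv_data[1:]:
--         for p, cell in zip(state, row):
--             v = cell.strip()
--             if v:
--                 if v in p[0]:
--                     p[1] = True
--                 else:
--                     p[0].add(v)
--     return [h for h, p in zip(headers, state) if not p[1]]
-- ===== Notes on version B (the rewrite author's own statement) =====
-- stated objective: alternative
-- what changed: Replaced the column-major nested loops (re-scanning all rows for every header and building a values list plus set per column) by one row-major pass that maintains a seen-set and a has-duplicate flag per column, then emits headers whose flag is still clear.
import Mathlib
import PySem

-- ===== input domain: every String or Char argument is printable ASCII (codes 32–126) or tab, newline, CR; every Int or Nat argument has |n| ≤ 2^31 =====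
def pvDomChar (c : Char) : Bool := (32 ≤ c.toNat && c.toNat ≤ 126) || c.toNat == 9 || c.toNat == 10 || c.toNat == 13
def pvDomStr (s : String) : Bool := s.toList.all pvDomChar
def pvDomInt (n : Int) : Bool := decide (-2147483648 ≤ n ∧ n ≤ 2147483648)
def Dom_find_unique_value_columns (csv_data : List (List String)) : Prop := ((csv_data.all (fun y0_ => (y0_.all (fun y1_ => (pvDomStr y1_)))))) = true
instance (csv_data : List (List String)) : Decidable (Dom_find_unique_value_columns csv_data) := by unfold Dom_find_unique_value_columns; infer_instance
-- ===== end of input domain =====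

-- B replaces A's column-major nested loops by a single row-major pass maintaining a
-- per-column seen-set and duplicate flag (alternative decomposition, same asymptotic cost).

-- ===== PORT A =====
-- literal port of A: for each header index, re-scan all data rows collecting the non-empty
-- stripped values of that column, then compare len(values) with len(set(values))
def find_unique_value_columns (csv_data : List (List String)) : List String :=
  if csv_data = [] ∨ csv_data.length < 2 then []
  else
    let headers := PySem.List.pyGetD csv_data 0 []
    (PySem.List.enumerate headers 0).foldl (fun unique_columns x =>
      let values := (PySem.List.pyRange 1 csv_data.length 1).foldl (fun values row_idx =>
        let row := PySem.List.pyGetD csv_data row_idx []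
        if x.1 < (row.length : Int) then
          let value := PySem.Str.strip (PySem.List.pyGetD row x.1 "")
          if value ≠ "" then values ++ [value] else values
        else values) []
      if values.length = (PySem.Set.ofList values).length then unique_columns ++ [x.2]
      else unique_columns) []

-- ===== PORT B =====
-- per-cell update of one column's [seen, has_dup] state
def pvUpd (p : PySem.Set String × Bool) (cell : String) : PySem.Set String × Bool :=
  let v := PySem.Str.strip cell
  if v = "" then p
  else if PySem.Set.contains p.1 v then (p.1, true)
  else (PySem.Set.add p.1 v, p.2)

-- 'for p, cell in zip(state, row)': positional, stops at the shorter list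
def pvUpdRow : List (PySem.Set String × Bool) → List String → List (PySem.Set String × Bool)
  | [], _ => []
  | st, [] => st
  | p :: st, c :: row => pvUpd p c :: pvUpdRow st row

def find_unique_value_columns_alt (csv_data : List (List String)) : List String :=
  if csv_data.length < 2 then []
  else
    let headers := csv_data.headD []
    let state : List (PySem.Set String × Bool) := headers.map (fun _ => (PySem.Set.empty, false))
    let state := (csv_data.drop 1).foldl pvUpdRow state  -- csv_data[1:], index nonneg: drop is exact
    (headers.zip state).foldl (fun acc hp => if hp.2.2 = false then acc ++ [hp.1] else acc) []

-- ===== PRECONDITION & SPEC =====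
def Spec_find_unique_value_columns (csv_data : List (List String)) (out : List String) : Prop := out = find_unique_value_columns_alt csv_data
instance (csv_data : List (List String)) (out : List String) : Decidable (Spec_find_unique_value_columns csv_data out) := by unfold Spec_find_unique_value_columns; infer_instance

-- ===== CLAIM (what is proved, stated in full; the proofs are below) =====
def Claim_equal_find_unique_value_columns : Prop := ∀ (csv_data : List (List String)), Dom_find_unique_value_columns csv_data → Spec_find_unique_value_columns csv_data (find_unique_value_columns csv_data)

-- ===== LEMMAS AND PROOFS =====

-- A's inner loop (the values of column i), as a function of the column index
def pvValsAt (csv_data : List (List String)) (i : Int) : List String :=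
  (PySem.List.pyRange 1 csv_data.length 1).foldl (fun values row_idx =>
    let row := PySem.List.pyGetD csv_data row_idx []
    if i < (row.length : Int) then
      let value := PySem.Str.strip (PySem.List.pyGetD row i "")
      if value ≠ "" then values ++ [value] else values
    else values) []

-- the cells of column j present in the data rows
def pvCol (tl : List (List String)) (j : Nat) : List String := tl.filterMap (fun r => r[j]?)

-- the non-empty stripped values among a column's cells
def pvVals (cells : List String) : List String :=
  (cells.filter (fun c => decide (PySem.Str.strip c ≠ ""))).map PySem.Str.strip

-- pvUpd's action on a single non-empty stripped value
def pvStep (p : PySem.Set String × Bool) (v : String) : PySem.Set String × Bool :=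
  if PySem.Set.contains p.1 v then (p.1, true) else (PySem.Set.add p.1 v, p.2)

theorem pv_ofList_sublist (xs : List String) : (PySem.Set.ofList xs).Sublist xs := by
  induction xs using List.reverseRecOn with
  | nil => simp [PySem.Set.ofList_nil]
  | append_singleton ys y ih =>
    rw [PySem.Set.ofList_append_singleton, PySem.Set.add_eq_ite]
    split_ifs with h
    · exact ih.trans (List.sublist_append_left ys [y])
    · exact ih.append (List.Sublist.refl [y])

theorem pv_len_iff (xs : List String) :
    (xs.length = (PySem.Set.ofList xs).length) ↔ xs.Nodup := by
  constructor
  · intro h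
    have he := (pv_ofList_sublist xs).eq_of_length h.symm
    rw [← he]
    exact PySem.Set.nodup_ofList xs
  · intro h
    rw [PySem.Set.ofList_eq_self_of_nodup xs h]

theorem pvVals_cons (c : String) (cells : List String) :
    pvVals (c :: cells) = if PySem.Str.strip c ≠ "" then PySem.Str.strip c :: pvVals cells else pvVals cells := by
  by_cases h : PySem.Str.strip c = "" <;> simp [pvVals, h]

theorem pv_valsA (tl : List (List String)) (j : Nat) : ∀ (acc : List String),
    tl.foldl (fun vs r =>
      if (j : Int) < (r.length : Int) then
        (if PySem.Str.strip (PySem.List.pyGetD r (j : Int) "") ≠ "" then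
          vs ++ [PySem.Str.strip (PySem.List.pyGetD r (j : Int) "")] else vs)
      else vs) acc
    = acc ++ pvVals (pvCol tl j) := by
  induction tl with
  | nil => intro acc; simp [pvCol, pvVals]
  | cons r tl ih =>
    intro acc
    rw [List.foldl_cons]
    by_cases hj : j < r.length
    · have hj' : (j : Int) < (r.length : Int) := by exact_mod_cast hj
      rw [if_pos hj']
      have hget : PySem.List.pyGetD r (j : Int) "" = r[j] := by
        simp [PySem.List.pyGetD_natCast, List.getD_eq_getElem?_getD, List.getElem?_eq_getElem hj]
      have hcol : pvCol (r :: tl) j = r[j] :: pvCol tl j := by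
        simp [pvCol, List.getElem?_eq_getElem hj]
      rw [hget, hcol, pvVals_cons]
      split_ifs with hs
      · rw [ih (acc ++ [PySem.Str.strip r[j]])]
        simp
      · exact ih acc
    · rw [if_neg (by simpa using hj)]
      have hnone : r[j]? = none := List.getElem?_eq_none (by omega)
      have hcol : pvCol (r :: tl) j = pvCol tl j := by
        simp [pvCol, hnone]
      rw [hcol]
      exact ih acc

theorem pvValsAt_eq (hd : List String) (tl : List (List String)) (j : Nat) :
    pvValsAt (hd :: tl) (j : Int) = pvVals (pvCol tl j) := by
  unfold pvValsAt
  rw [PySem.List.foldl_pyRange_pyGetD' (hd :: tl) [] (fun vs row =>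
      if (j : Int) < (row.length : Int) then
        (if PySem.Str.strip (PySem.List.pyGetD row (j : Int) "") ≠ "" then
          vs ++ [PySem.Str.strip (PySem.List.pyGetD row (j : Int) "")] else vs)
      else vs) [] (a := 1) (by norm_num)]
  simpa using pv_valsA tl j []

theorem pvUpdRow_length (st : List (PySem.Set String × Bool)) (row : List String) :
    (pvUpdRow st row).length = st.length := by
  induction st generalizing row with
  | nil => simp [pvUpdRow]
  | cons p st ih =>
    cases row with
    | nil => rfl
    | cons c row => simp [pvUpdRow, ih]

theorem pvUpdRow_get? (st : List (PySem.Set String × Bool)) (row : List String) (k : Nat) :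
    (pvUpdRow st row)[k]? = st[k]?.map (fun p => match row[k]? with | some c => pvUpd p c | none => p) := by
  induction st generalizing row k with
  | nil => simp [pvUpdRow]
  | cons p st ih =>
    cases row with
    | nil => simp [pvUpdRow]
    | cons c row =>
      cases k with
      | zero => simp [pvUpdRow]
      | succ k => simp [pvUpdRow, ih]

theorem pv_foldl_get? (tl : List (List String)) (k : Nat) : ∀ st : List (PySem.Set String × Bool),
    (tl.foldl pvUpdRow st)[k]? = st[k]?.map (fun p => (pvCol tl k).foldl pvUpd p) := by
  induction tl with
  | nil =>
    intro st
    simp [pvCol]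
  | cons r tl ih =>
    intro st
    rw [List.foldl_cons, ih, pvUpdRow_get?]
    cases hr : r[k]? <;> cases hs : st[k]? <;>
      simp [pvCol, hr]

theorem pvUpd_eq_step (cells : List String) : ∀ p : PySem.Set String × Bool,
    cells.foldl pvUpd p = (pvVals cells).foldl pvStep p := by
  induction cells with
  | nil => intro p; simp [pvVals]
  | cons c cells ih =>
    intro p
    rw [List.foldl_cons, pvVals_cons]
    by_cases hs : PySem.Str.strip c = ""
    · rw [if_neg (by simp [hs])]
      rw [show pvUpd p c = p from by simp [pvUpd, hs]]
      exact ih p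
    · rw [if_pos (by simp [hs]), List.foldl_cons]
      rw [show pvUpd p c = pvStep p (PySem.Str.strip c) from by simp [pvUpd, pvStep, hs]]
      exact ih _

theorem pvStep_spec (vs : List String) : ∀ (s : PySem.Set String) (b : Bool), s.Nodup →
    (vs.foldl pvStep (s, b)).1 = PySem.Set.update s vs ∧
    ((vs.foldl pvStep (s, b)).2 = false ↔ b = false ∧ vs.Nodup ∧ ∀ v ∈ vs, v ∉ s) := by
  induction vs with
  | nil => intro s b _; simp [PySem.Set.update_nil]
  | cons v vs ih =>
    intro s b hnd
    rw [List.foldl_cons]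
    by_cases hv : v ∈ s
    · rw [show pvStep (s, b) v = (s, true) from by simp [pvStep, hv]]
      obtain ⟨h1, h2⟩ := ih s true hnd
      refine ⟨by rw [h1, PySem.Set.update_cons, PySem.Set.add_of_mem hv], ?_⟩
      rw [h2]
      constructor
      · rintro ⟨h, -⟩; exact absurd h (by simp)
      · rintro ⟨-, -, hall⟩; exact absurd hv (hall v (by simp))
    · rw [show pvStep (s, b) v = (PySem.Set.add s v, b) from by
        simp [pvStep, hv]]
      obtain ⟨h1, h2⟩ := ih (PySem.Set.add s v) b (PySem.Set.nodup_add s v hnd)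
      refine ⟨by rw [h1, PySem.Set.update_cons], ?_⟩
      rw [h2]
      simp only [List.nodup_cons, List.mem_cons, PySem.Set.mem_add]
      constructor
      · rintro ⟨hb, hnd2, hall⟩
        refine ⟨hb, ⟨fun hm => (hall v hm) (Or.inr rfl), hnd2⟩, ?_⟩
        rintro w (rfl | hw)
        · exact hv
        · exact fun hws => (hall w hw) (Or.inl hws)
      · rintro ⟨hb, ⟨hvvs, hnd2⟩, hall⟩
        refine ⟨hb, hnd2, ?_⟩
        rintro w hw (hws | rfl)
        · exact (hall w (Or.inr hw)) hws
        · exact hvvs hw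

theorem pv_flag (cells : List String) :
    ((cells.foldl pvUpd (PySem.Set.empty, false)).2 = false) ↔ (pvVals cells).Nodup := by
  rw [pvUpd_eq_step]
  rw [(pvStep_spec (pvVals cells) PySem.Set.empty false List.nodup_nil).2]
  simp [PySem.Set.empty]

theorem pv_foldl_length (tl : List (List String)) : ∀ st : List (PySem.Set String × Bool),
    (tl.foldl pvUpdRow st).length = st.length := by
  induction tl with
  | nil => intro st; rfl
  | cons r tl ih => intro st; rw [List.foldl_cons, ih, pvUpdRow_length]

theorem pv_final (P : Int → Prop) [DecidablePred P] : ∀ (hd : List String)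
    (st : List (PySem.Set String × Bool)) (s : Int) (acc : List String),
    ∀ (hlen : st.length = hd.length),
    (∀ k (hk : k < hd.length), (P (s + k) ↔ (st[k]'(by omega)).2 = false)) →
    (PySem.List.enumerate hd s).foldl (fun uc x => if P x.1 then uc ++ [x.2] else uc) acc
      = (hd.zip st).foldl (fun acc hp => if hp.2.2 = false then acc ++ [hp.1] else acc) acc := by
  intro hd
  induction hd with
  | nil =>
    intro st s acc hlen _
    have : st = [] := List.eq_nil_of_length_eq_zero (by simpa using hlen)
    subst this
    simp [PySem.List.enumerate_nil]
  | cons a hd ih =>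
    intro st s acc hlen hyp
    obtain ⟨p, st', rfl⟩ : ∃ p st', st = p :: st' := by
      cases st with
      | nil => simp at hlen
      | cons p st' => exact ⟨p, st', rfl⟩
    rw [PySem.List.enumerate_cons]
    simp only [List.zip_cons_cons, List.foldl_cons]
    have hlen' : st'.length = hd.length := by simpa using hlen
    have h0 : P s ↔ p.2 = false := by simpa using hyp 0 (by simp)
    have hrec : ∀ k (hk : k < hd.length), (P (s + 1 + k) ↔ (st'[k]'(by omega)).2 = false) := by
      intro k hk
      have h := hyp (k + 1) (by simp; omega)
      have harg : s + ((k : Int) + 1) = s + 1 + k := by ring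
      simpa [harg] using h
    by_cases hP : P s
    · rw [if_pos hP, if_pos (h0.1 hP)]
      exact ih st' (s + 1) (acc ++ [a]) (by simpa using hlen) hrec
    · rw [if_neg hP, if_neg (fun hc => hP (h0.2 hc))]
      exact ih st' (s + 1) acc (by simpa using hlen) hrec

-- ===== VERDICT (by name: the statement is the Claim_ definition above) =====
theorem find_unique_value_columns_spec : Claim_equal_find_unique_value_columns := by
  intro csv _
  unfold Spec_find_unique_value_columns
  cases csv with
  | nil => simp [find_unique_value_columns, find_unique_value_columns_alt]
  | cons hd tl =>
    cases tl with
    | nil => simp [find_unique_value_columns, find_unique_value_columns_alt]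
    | cons r tl' =>
      have hA : find_unique_value_columns (hd :: r :: tl')
          = (PySem.List.enumerate hd 0).foldl (fun uc x =>
              if (pvValsAt (hd :: r :: tl') x.1).length
                  = (PySem.Set.ofList (pvValsAt (hd :: r :: tl') x.1)).length then uc ++ [x.2]
              else uc) [] := by
        unfold find_unique_value_columns pvValsAt
        rw [if_neg (by simp)]
        simp only [PySem.List.pyGetD_zero_cons]
      have hB : find_unique_value_columns_alt (hd :: r :: tl')
          = (hd.zip ((r :: tl').foldl pvUpdRow (hd.map (fun _ => (PySem.Set.empty, false))))).foldl
              (fun acc hp => if hp.2.2 = false then acc ++ [hp.1] else acc) [] := by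
        unfold find_unique_value_columns_alt
        rw [if_neg (by simp)]
        rfl
      rw [hA, hB]
      have hlen : ((r :: tl').foldl pvUpdRow (hd.map (fun _ => (PySem.Set.empty, false)))).length
          = hd.length := by
        rw [pv_foldl_length]; simp
      refine pv_final (fun i => (pvValsAt (hd :: r :: tl') i).length
          = (PySem.Set.ofList (pvValsAt (hd :: r :: tl') i)).length) hd _ 0 [] hlen ?_
      intro k hk
      show (pvValsAt (hd :: r :: tl') (0 + (k : Int))).length
          = (PySem.Set.ofList (pvValsAt (hd :: r :: tl') (0 + (k : Int)))).length ↔ _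
      have hz : ((0 : Int) + k) = (k : Int) := by ring
      rw [hz, pvValsAt_eq hd (r :: tl') k, pv_len_iff]
      have hsome : ((r :: tl').foldl pvUpdRow (hd.map (fun _ => (PySem.Set.empty, false))))[k]?
          = some ((pvCol (r :: tl') k).foldl pvUpd (PySem.Set.empty, false)) := by
        rw [pv_foldl_get?]
        have hinit : (hd.map (fun _ => (PySem.Set.empty (α := String), false)))[k]?
            = some (PySem.Set.empty, false) := by
          rw [List.getElem?_map, List.getElem?_eq_getElem hk]
          rfl
        rw [hinit]
        rfl
      have hval : (((r :: tl').foldl pvUpdRow (hd.map (fun _ => (PySem.Set.empty, false))))[k]'(by omega))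
          = (pvCol (r :: tl') k).foldl pvUpd (PySem.Set.empty, false) := by
        rw [← Option.some_inj, ← List.getElem?_eq_getElem]
        exact hsome
      rw [hval, pv_flag]
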